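-- pv_equiv track=rewrite | github.com/fanbu1995/video_proc_code | trim_indices.py | trim_indices
-- ===== SOURCE A (Python) =====
-- def trim_indices(inds, trim_num, trim_thres = 5):
--         l = len(inds)
--         to_trim = []
--
--         for i in range(min(l-1, trim_num)):
--                 if inds[i+1] - inds[i] >= trim_thres:
--                     to_trim.extend(range(i+1))
--
--         for i in range(l-1, max(0, l-trim_num-1), -1):
--             if inds[i] - inds[i-1] >= trim_thres:
--                     to_trim.extend(range(i,l))
--
--         return([inds[i] for i in range(l) if i not in to_trim])
-- ===== SOURCE B (Python) =====
-- def trim_indices(inds, trim_num, trim_thres=5):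
--     l = len(inds)
--     gaps = [y - x >= trim_thres for x, y in zip(inds, inds[1:])]
--     k = max(min(l - 1, trim_num), 0)
--     cuts = [j + 1 for j, g in enumerate(gaps[:k]) if g]
--     lo = cuts[-1] if cuts else 0
--     s = max(0, l - trim_num - 1)
--     hi = next((j + 1 for j, g in enumerate(gaps) if j >= s and g), l)
--     return inds[lo:hi]
-- ===== Notes on version B (the rewrite author's own statement) =====
-- stated objective: faster
-- what changed: B replaces A's accumulated to_trim index list (unions of ranges, quadratic to build, plus an 'i not in to_trim' list scan per kept element) by a single precomputed list of adjacent-gap flags from which the last prefix cut and the first suffix cut are read off, followed by one slice inds[lo:hi].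
import Mathlib
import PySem

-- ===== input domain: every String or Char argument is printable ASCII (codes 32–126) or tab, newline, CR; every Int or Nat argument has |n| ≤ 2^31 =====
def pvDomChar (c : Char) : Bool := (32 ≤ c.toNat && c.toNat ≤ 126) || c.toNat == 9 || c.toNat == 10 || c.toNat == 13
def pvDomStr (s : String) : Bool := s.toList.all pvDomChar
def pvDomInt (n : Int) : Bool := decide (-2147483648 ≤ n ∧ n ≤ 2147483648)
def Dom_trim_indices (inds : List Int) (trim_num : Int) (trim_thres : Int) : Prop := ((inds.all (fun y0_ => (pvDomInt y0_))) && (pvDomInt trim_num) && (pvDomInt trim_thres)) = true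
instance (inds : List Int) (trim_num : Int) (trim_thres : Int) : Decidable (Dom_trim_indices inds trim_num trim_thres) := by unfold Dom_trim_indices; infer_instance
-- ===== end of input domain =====

-- B precomputes the list of adjacent-gap flags once (zip), reads off the last prefix cut and the
-- first suffix cut from it, and slices; objective: faster (asymptotic, vs A's quadratic to_trim list).

-- ===== PORT A =====
def trim_indices (inds : List Int) (trim_num : Int) (trim_thres : Int) : List Int :=
  let l : Int := inds.length
  let to_trim : List Int :=
    (PySem.List.pyRange 0 (min (l - 1) trim_num) 1).foldl
      (fun acc i =>
        if PySem.List.pyGetD inds (i + 1) 0 - PySem.List.pyGetD inds i 0 ≥ trim_thres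
        then acc ++ PySem.List.pyRange 0 (i + 1) 1 else acc) []
  let to_trim2 : List Int :=
    (PySem.List.pyRange (l - 1) (max 0 (l - trim_num - 1)) (-1)).foldl
      (fun acc i =>
        if PySem.List.pyGetD inds i 0 - PySem.List.pyGetD inds (i - 1) 0 ≥ trim_thres
        then acc ++ PySem.List.pyRange i l 1 else acc) to_trim
  (PySem.List.pyRange 0 l 1).foldl
    (fun acc i => if to_trim2.contains i then acc else acc ++ [PySem.List.pyGetD inds i 0]) []

-- ===== PORT B =====
-- transliteration of Source B: gaps via zip, cuts comprehension → filterMap over enumerate,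
-- 'cuts[-1] if cuts else 0' → getLast?.getD 0, 'next(…, l)' → find?.map.getD l, slice.
-- gaps[:k] with k = max(…, 0) ≥ 0 is exactly List.take k.toNat.
def trim_indices_alt (inds : List Int) (trim_num : Int) (trim_thres : Int) : List Int :=
  let l : Int := inds.length
  let gaps : List Bool := (inds.zip inds.tail).map (fun p => decide (p.2 - p.1 ≥ trim_thres))
  let k : Int := max (min (l - 1) trim_num) 0
  let cuts : List Int :=
    (PySem.List.enumerate (gaps.take k.toNat)).filterMap
      (fun p => if p.2 then some (p.1 + 1) else none)
  let lo : Int := cuts.getLast?.getD 0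
  let s : Int := max 0 (l - trim_num - 1)
  let hi : Int :=
    (((PySem.List.enumerate gaps).find? (fun p => decide (s ≤ p.1) && p.2)).map
      (fun p => p.1 + 1)).getD l
  PySem.List.slice inds (some lo) (some hi)

-- ===== PRECONDITION & SPEC =====
def Spec_trim_indices (inds : List Int) (trim_num : Int) (trim_thres : Int) (out : List Int) : Prop := out = trim_indices_alt inds trim_num trim_thres
instance (inds : List Int) (trim_num : Int) (trim_thres : Int) (out : List Int) : Decidable (Spec_trim_indices inds trim_num trim_thres out) := by unfold Spec_trim_indices; infer_instance

-- ===== CLAIM (what is proved, stated in full; the proofs are below) =====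
def Claim_equal_trim_indices : Prop := ∀ (inds : List Int) (trim_num : Int) (trim_thres : Int), Dom_trim_indices inds trim_num trim_thres → Spec_trim_indices inds trim_num trim_thres (trim_indices inds trim_num trim_thres)

-- ===== LEMMAS AND PROOFS =====

-- A's first loop: to_trim grows by ranges [0, i+1); its membership is exactly [0, lo)
-- where lo is the running "last qualifying i, plus one".
theorem pv_prefix_fold (p : Int → Prop) [DecidablePred p] (n : Nat) :
    0 ≤ (PySem.List.pyRange 0 (n : Int) 1).foldl (fun v i => if p i then i + 1 else v) 0 ∧
    (PySem.List.pyRange 0 (n : Int) 1).foldl (fun v i => if p i then i + 1 else v) 0 ≤ (n : Int) ∧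
    ∀ j : Int,
      (j ∈ (PySem.List.pyRange 0 (n : Int) 1).foldl
          (fun acc i => if p i then acc ++ PySem.List.pyRange 0 (i + 1) 1 else acc) ([] : List Int) ↔
        0 ≤ j ∧ j < (PySem.List.pyRange 0 (n : Int) 1).foldl (fun v i => if p i then i + 1 else v) 0) := by
  induction n with
  | zero =>
      rw [PySem.List.pyRange_one_eq_nil (by omega)]
      refine ⟨le_refl _, le_refl _, fun j => ?_⟩
      simp only [List.foldl_nil, List.not_mem_nil, false_iff]
      omega
  | succ n ih =>
      obtain ⟨h0, hn, hmem⟩ := ih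
      have hc : (((n + 1 : Nat) : Int)) = (n : Int) + 1 := by push_cast; ring
      rw [hc, PySem.List.pyRange_one_succ_right (by omega), List.foldl_append, List.foldl_append,
        List.foldl_cons, List.foldl_nil, List.foldl_cons, List.foldl_nil]
      by_cases hp : p (n : Int)
      · rw [if_pos hp, if_pos hp]
        refine ⟨by omega, by omega, fun j => ?_⟩
        rw [List.mem_append, hmem j, PySem.List.mem_pyRange_one]
        omega
      · rw [if_neg hp, if_neg hp]
        exact ⟨h0, by omega, hmem⟩

-- A's second loop (the countdown, read back-to-front as a foldr over the increasing range):
-- membership grows by [hi, l) where hi is the first qualifying index (default l).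
theorem pv_suffix_fold (p : Int → Prop) [DecidablePred p] (l : Int) (init : List Int) :
    ∀ xs : List Int, xs.Pairwise (· < ·) → (∀ y ∈ xs, y < l) →
      (((xs.find? fun i => decide (p i)).getD l = l ∨ ((xs.find? fun i => decide (p i)).getD l) ∈ xs) ∧
       ∀ j : Int,
         (j ∈ xs.foldr (fun i acc => if p i then acc ++ PySem.List.pyRange i l 1 else acc) init ↔
           j ∈ init ∨ (((xs.find? fun i => decide (p i)).getD l) ≤ j ∧ j < l))) := by
  intro xs
  induction xs with
  | nil =>
      intro _ _
      refine ⟨Or.inl rfl, fun j => ?_⟩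
      simp only [List.foldr_nil, List.find?_nil, Option.getD_none]
      constructor
      · exact Or.inl
      · rintro (h | ⟨h1, h2⟩)
        · exact h
        · omega
  | cons x xs ih =>
      intro hpw hlt
      have hx : x < l := hlt x List.mem_cons_self
      have hxlt : ∀ y ∈ xs, x < y := (List.pairwise_cons.mp hpw).1
      obtain ⟨hmem, hchar⟩ := ih (List.pairwise_cons.mp hpw).2 (fun y hy => hlt y (List.mem_cons_of_mem _ hy))
      by_cases hp : p x
      · rw [List.find?_cons_of_pos (by simp [hp]), List.foldr_cons, if_pos hp]
        refine ⟨Or.inr List.mem_cons_self, fun j => ?_⟩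
        have hge : x ≤ (xs.find? fun i => decide (p i)).getD l := by
          rcases hmem with h | h
          · omega
          · exact le_of_lt (hxlt _ h)
        rw [List.mem_append, hchar j, PySem.List.mem_pyRange_one, Option.getD_some]
        constructor
        · rintro ((h | ⟨h1, h2⟩) | ⟨h1, h2⟩)
          · exact Or.inl h
          · exact Or.inr ⟨by omega, h2⟩
          · exact Or.inr ⟨h1, h2⟩
        · rintro (h | ⟨h1, h2⟩)
          · exact Or.inl (Or.inl h)
          · exact Or.inr ⟨h1, h2⟩
      · rw [List.find?_cons_of_neg (by simp [hp]), List.foldr_cons, if_neg hp]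
        exact ⟨hmem.imp id (List.mem_cons_of_mem _), hchar⟩

theorem pv_pyRange_zero_toNat (m : Int) :
    PySem.List.pyRange 0 m 1 = PySem.List.pyRange 0 ((m.toNat : Nat) : Int) 1 := by
  rw [PySem.List.pyRange_one, PySem.List.pyRange_one]; congr 2; omega

theorem pv_filter_pyRange_eq (l lo hi : Int) (hlo : 0 ≤ lo) (hhil : hi ≤ l) :
    (PySem.List.pyRange 0 l 1).filter (fun i => decide (lo ≤ i ∧ i < hi)) = PySem.List.pyRange lo hi 1 := by
  haveI : Std.Antisymm ((· < ·) : Int → Int → Prop) := ⟨fun a b h1 h2 => absurd h1 (asymm h2)⟩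
  have hperm : ((PySem.List.pyRange 0 l 1).filter (fun i => decide (lo ≤ i ∧ i < hi))).Perm
      (PySem.List.pyRange lo hi 1) := by
    apply (List.perm_ext_iff_of_nodup ((PySem.List.nodup_pyRange_one _ _).filter _)
      (PySem.List.nodup_pyRange_one _ _)).mpr
    intro a
    simp only [List.mem_filter, PySem.List.mem_pyRange_one, decide_eq_true_eq]
    omega
  exact List.Perm.eq_of_pairwise' ((PySem.List.pairwise_lt_pyRange_one _ _).filter _)
    (PySem.List.pairwise_lt_pyRange_one _ _) hperm

theorem pv_map_pyRange_eq_slice (inds : List Int) (lo hi : Int) (hlo : 0 ≤ lo) (hhi0 : 0 ≤ hi)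
    (hhil : hi ≤ (inds.length : Int)) :
    (PySem.List.pyRange lo hi 1).map (fun i => PySem.List.pyGetD inds i 0) =
      PySem.List.slice inds (some lo) (some hi) := by
  rw [PySem.List.slice_toNat _ hlo hhi0]
  by_cases h : lo ≤ hi
  · have hdrop := PySem.List.map_pyGetD_pyRange' (xs := inds) (a := lo) (d := 0) hlo
    rw [PySem.List.pyRange_one_append lo hi (inds.length : Int) h hhil, List.map_append] at hdrop
    have hlen : ((PySem.List.pyRange lo hi 1).map (fun i => PySem.List.pyGetD inds i 0)).length
        = hi.toNat - lo.toNat := by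
      rw [List.length_map, PySem.List.length_pyRange_one]; omega
    calc (PySem.List.pyRange lo hi 1).map (fun i => PySem.List.pyGetD inds i 0)
        = (((PySem.List.pyRange lo hi 1).map (fun i => PySem.List.pyGetD inds i 0)
            ++ (PySem.List.pyRange hi (inds.length : Int) 1).map (fun i => PySem.List.pyGetD inds i 0)).take
            (hi.toNat - lo.toNat)) := by
          rw [List.take_left' hlen]
      _ = (inds.drop lo.toNat).take (hi.toNat - lo.toNat) := by rw [hdrop]
  · rw [PySem.List.pyRange_one_eq_nil (by omega)]
    have hz : hi.toNat - lo.toNat = 0 := by omega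
    rw [hz]
    simp

-- A equals the slice characterised by the two pyRange-level cut positions.
theorem pv_main (inds : List Int) (p q : Int → Prop) [DecidablePred p] [DecidablePred q]
    (m s : Int) (hs0 : 0 ≤ s) :
    ((PySem.List.pyRange 0 ((inds.length : Nat) : Int) 1).foldl
      (fun acc i =>
        if ((PySem.List.pyRange (((inds.length : Nat) : Int) - 1) s (-1)).foldl
            (fun acc2 i2 => if q i2 then acc2 ++ PySem.List.pyRange i2 ((inds.length : Nat) : Int) 1 else acc2)
            ((PySem.List.pyRange 0 m 1).foldl
              (fun acc3 i3 => if p i3 then acc3 ++ PySem.List.pyRange 0 (i3 + 1) 1 else acc3) [])).contains i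
        then acc else acc ++ [PySem.List.pyGetD inds i 0]) []) =
    PySem.List.slice inds
      (some ((PySem.List.pyRange 0 m 1).foldl (fun v i => if p i then i + 1 else v) 0))
      (some (((PySem.List.pyRange (s + 1) ((inds.length : Nat) : Int) 1).find?
        (fun i => decide (q i))).getD ((inds.length : Nat) : Int))) := by
  rw [pv_pyRange_zero_toNat m]
  set L : Int := ((inds.length : Nat) : Int) with hL
  have hL0 : 0 ≤ L := by rw [hL]; exact Int.natCast_nonneg _
  obtain ⟨hlo0, hlon, hlomem⟩ := pv_prefix_fold p m.toNat
  set lo := (PySem.List.pyRange 0 ((m.toNat : Nat) : Int) 1).foldl (fun v i => if p i then i + 1 else v) 0 with hlodef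
  set t1 := (PySem.List.pyRange 0 ((m.toNat : Nat) : Int) 1).foldl
      (fun acc3 i3 => if p i3 then acc3 ++ PySem.List.pyRange 0 (i3 + 1) 1 else acc3) ([] : List Int) with ht1
  have hrev : PySem.List.pyRange (L - 1) s (-1) = (PySem.List.pyRange (s + 1) L 1).reverse := by
    rw [PySem.List.pyRange_neg_one_eq_reverse]
    norm_num
  rw [hrev, List.foldl_reverse]
  obtain ⟨hhiB, hhichar⟩ := pv_suffix_fold q L t1 (PySem.List.pyRange (s + 1) L 1)
    (PySem.List.pairwise_lt_pyRange_one _ _)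
    (fun y hy => ((PySem.List.mem_pyRange_one).mp hy).2)
  set hi := ((PySem.List.pyRange (s + 1) L 1).find? fun i => decide (q i)).getD L with hhidef
  set t2 := (PySem.List.pyRange (s + 1) L 1).foldr
      (fun i acc => if q i then acc ++ PySem.List.pyRange i L 1 else acc) t1 with ht2
  have hhib : 0 ≤ hi ∧ hi ≤ L := by
    rcases hhiB with h | h
    · omega
    · have := (PySem.List.mem_pyRange_one).mp h
      omega
  have hfun : (fun (acc : List Int) i => if t2.contains i then acc else acc ++ [PySem.List.pyGetD inds i 0])
      = fun acc i => if ¬ t2.contains i = true then acc ++ [PySem.List.pyGetD inds i 0] else acc := by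
    funext acc i
    by_cases hc : t2.contains i = true
    · rw [if_pos hc, if_neg (not_not_intro hc)]
    · rw [if_neg hc, if_pos hc]
  rw [hfun, PySem.List.foldl_append_ite, List.nil_append]
  rw [List.filter_congr (q := fun i => decide (lo ≤ i ∧ i < hi))
    (fun i hmemi => by
      have hib := (PySem.List.mem_pyRange_one).mp hmemi
      rw [decide_eq_decide]
      have hc : t2.contains i = true ↔ i ∈ t2 := by
        simp
      rw [hc, hhichar i, hlomem i]
      omega)]
  rw [pv_filter_pyRange_eq L lo hi hlo0 hhib.2]
  exact pv_map_pyRange_eq_slice inds lo hi hlo0 hhib.1 (hL ▸ hhib.2)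

-- find? only looks at the predicate's values on members.
theorem pv_find?_congr {α : Type} (p q : α → Bool) (l : List α) (h : ∀ x ∈ l, p x = q x) :
    l.find? p = l.find? q := by
  induction l with
  | nil => rfl
  | cons x xs ih =>
      rw [List.find?_cons, List.find?_cons, h x List.mem_cons_self]
      cases q x
      · exact ih (fun y hy => h y (List.mem_cons_of_mem _ hy))
      · rfl

-- B's "last cut position" (last element of the comprehension, default 0) equals
-- A-side's running foldl over the same index range.
theorem pv_last (c : Int → Bool) (n : Nat) :
    (((PySem.List.pyRange 0 (n : Int) 1).filterMap
        (fun j => if c j then some (j + 1) else none)).getLast?).getD 0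
    = (PySem.List.pyRange 0 (n : Int) 1).foldl (fun v i => if c i then i + 1 else v) 0 := by
  induction n with
  | zero => rw [PySem.List.pyRange_one_eq_nil (by omega)]; rfl
  | succ n ih =>
      have hc : (((n + 1 : Nat)) : Int) = (n : Int) + 1 := by push_cast; ring
      rw [hc, PySem.List.pyRange_one_succ_right (by omega), List.filterMap_append,
        List.foldl_append, List.foldl_cons, List.foldl_nil]
      cases hcn : c (n : Int)
      · rw [show (List.filterMap (fun j => if c j then some (j + 1) else none) [(n : Int)]) = []
            from by simp [hcn]]
        rw [List.append_nil, if_neg (by simp), ih]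
      · rw [show (List.filterMap (fun j => if c j then some (j + 1) else none) [(n : Int)])
            = [(n : Int) + 1] from by simp [hcn]]
        rw [List.getLast?_concat, Option.getD_some, if_pos (by simp)]

-- the gap flag at index j is A's adjacent-difference test at j
theorem pv_gaps_getElem (inds : List Int) (th : Int) (j : Nat)
    (hj : j < (((inds.zip inds.tail).map (fun p => decide (p.2 - p.1 ≥ th)))).length) :
    ((inds.zip inds.tail).map (fun p => decide (p.2 - p.1 ≥ th)))[j]
    = decide (PySem.List.pyGetD inds ((j : Int) + 1) 0 - PySem.List.pyGetD inds (j : Int) 0 ≥ th) := by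
  have hj' : j + 1 < inds.length := by
    simp only [List.length_map, List.length_zip, List.length_tail] at hj
    omega
  rw [List.getElem_map, List.getElem_zip, List.getElem_tail]
  rw [PySem.List.pyGetD_eq_getElem inds 0 (by omega) (by omega),
    PySem.List.pyGetD_eq_getElem inds 0 (by omega) (by omega)]
  have h1 : ((j : Int) + 1).toNat = j + 1 := by omega
  have h2 : ((j : Int)).toNat = j := by omega
  simp only [h1, h2]

theorem pv_gaps_length (inds : List Int) (th : Int) :
    (((inds.zip inds.tail).map (fun p => decide (p.2 - p.1 ≥ th)))).length = inds.length - 1 := by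
  simp only [List.length_map, List.length_zip, List.length_tail]
  omega

-- B's lo (last qualifying prefix cut, read off the gaps list) equals A-side's foldl form.
theorem pv_lo_eq (inds : List Int) (tn th : Int) (h1 : 1 ≤ inds.length) :
    (((PySem.List.enumerate
          (((inds.zip inds.tail).map (fun p => decide (p.2 - p.1 ≥ th))).take
            (max (min ((inds.length : Int) - 1) tn) 0).toNat)).filterMap
        (fun p => if p.2 then some (p.1 + 1) else none)).getLast?).getD 0
    = (PySem.List.pyRange 0 (min ((inds.length : Int) - 1) tn) 1).foldl
        (fun v i =>
          if PySem.List.pyGetD inds (i + 1) 0 - PySem.List.pyGetD inds i 0 ≥ th then i + 1 else v) 0 := by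
  set gaps := (inds.zip inds.tail).map (fun p => decide (p.2 - p.1 ≥ th)) with hgaps
  have hgl : gaps.length = inds.length - 1 := by rw [hgaps]; exact pv_gaps_length inds th
  set k := max (min ((inds.length : Int) - 1) tn) 0 with hk
  have hkle : k.toNat ≤ gaps.length := by omega
  have hlen : (gaps.take k.toNat).length = k.toNat := by
    rw [List.length_take]; omega
  rw [PySem.List.enumerate_eq_map_pyRange _ false, List.filterMap_map, PySem.List.len_eq, hlen]
  rw [show ((fun p : Int × Bool => if p.2 then some (p.1 + 1) else none) ∘
        (fun j => (j, PySem.List.pyGetD (gaps.take k.toNat) j false)))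
      = fun j => if PySem.List.pyGetD (gaps.take k.toNat) j false then some (j + 1) else none from rfl]
  rw [pv_last]
  rw [pv_pyRange_zero_toNat (min ((inds.length : Int) - 1) tn)]
  have hnn : ((min ((inds.length : Int) - 1) tn).toNat : Int) = (k.toNat : Int) := by omega
  rw [hnn]
  apply PySem.List.foldl_congr_mem
  intro acc x hx
  have hxb := (PySem.List.mem_pyRange_one).mp hx
  have hxlt : x.toNat < (gaps.take k.toNat).length := by omega
  have hgx : PySem.List.pyGetD (gaps.take k.toNat) x false
      = decide (PySem.List.pyGetD inds (x + 1) 0 - PySem.List.pyGetD inds x 0 ≥ th) := by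
    rw [PySem.List.pyGetD_eq_getElem _ false hxb.1 (by omega), List.getElem_take]
    simp only [hgaps]
    rw [pv_gaps_getElem inds th x.toNat (by rw [pv_gaps_length]; omega)]
    have hxx : ((x.toNat : Nat) : Int) = x := by omega
    rw [hxx]
  rw [hgx]
  simp only [decide_eq_true_eq]

-- B's hi (first qualifying suffix cut via next() over enumerate) equals A-side's find? form.
theorem pv_hi_eq (inds : List Int) (tn th : Int) (h1 : 1 ≤ inds.length) :
    ((((PySem.List.enumerate ((inds.zip inds.tail).map (fun p => decide (p.2 - p.1 ≥ th)))).find?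
          (fun p => decide (max 0 ((inds.length : Int) - tn - 1) ≤ p.1) && p.2)).map
        (fun p => p.1 + 1)).getD (inds.length : Int))
    = ((PySem.List.pyRange (max 0 ((inds.length : Int) - tn - 1) + 1) (inds.length : Int) 1).find?
        (fun i => decide (PySem.List.pyGetD inds i 0 - PySem.List.pyGetD inds (i - 1) 0 ≥ th))).getD
        (inds.length : Int) := by
  set L := (inds.length : Int) with hL
  set s := max 0 (L - tn - 1) with hs
  have hs0 : 0 ≤ s := le_max_left 0 _
  set gaps := (inds.zip inds.tail).map (fun p => decide (p.2 - p.1 ≥ th)) with hgaps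
  have hgl : gaps.length = inds.length - 1 := by rw [hgaps]; exact pv_gaps_length inds th
  have hglI : ((gaps.length : Nat) : Int) = L - 1 := by omega
  rw [PySem.List.enumerate_eq_map_pyRange _ false, List.find?_map, Option.map_map,
    PySem.List.len_eq, hglI]
  rw [show ((fun p : Int × Bool => decide (s ≤ p.1) && p.2) ∘
        (fun j => (j, PySem.List.pyGetD gaps j false)))
      = fun j => decide (s ≤ j) && PySem.List.pyGetD gaps j false from rfl]
  rw [show ((fun p : Int × Bool => p.1 + 1) ∘ (fun j => (j, PySem.List.pyGetD gaps j false)))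
      = fun j => j + 1 from rfl]
  by_cases hcase : s ≤ L - 1
  · rw [PySem.List.pyRange_one_append 0 s (L - 1) hs0 hcase, List.find?_append]
    rw [show ((PySem.List.pyRange 0 s 1).find?
          (fun j => decide (s ≤ j) && PySem.List.pyGetD gaps j false)) = none from
        List.find?_eq_none.mpr (fun x hx => by
          have hxb := (PySem.List.mem_pyRange_one).mp hx
          simp only [Bool.and_eq_true, decide_eq_true_eq]
          rintro ⟨hc, -⟩
          omega)]
    rw [Option.none_or]
    rw [pv_find?_congr _
      (fun j => decide (PySem.List.pyGetD inds (j + 1) 0 - PySem.List.pyGetD inds j 0 ≥ th)) _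
      (fun x hx => by
        have hxb := (PySem.List.mem_pyRange_one).mp hx
        have hgx : PySem.List.pyGetD gaps x false
            = decide (PySem.List.pyGetD inds (x + 1) 0 - PySem.List.pyGetD inds x 0 ≥ th) := by
          rw [PySem.List.pyGetD_eq_getElem _ false (by omega) (by omega)]
          simp only [hgaps]
          rw [pv_gaps_getElem inds th x.toNat (by rw [pv_gaps_length]; omega)]
          have hxx : ((x.toNat : Nat) : Int) = x := by omega
          rw [hxx]
        rw [hgx, decide_eq_true (by omega : s ≤ x), Bool.true_and])]
    rw [PySem.List.pyRange_one s (L - 1), PySem.List.pyRange_one (s + 1) L,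
      List.find?_map, List.find?_map, Option.map_map]
    have hn : (L - 1 - s).toNat = (L - (s + 1)).toNat := by omega
    rw [hn]
    have hpred : ((fun i => decide (PySem.List.pyGetD inds i 0 - PySem.List.pyGetD inds (i - 1) 0 ≥ th)) ∘
          (fun k : Nat => s + 1 + (k : Int)))
        = ((fun j => decide (PySem.List.pyGetD inds (j + 1) 0 - PySem.List.pyGetD inds j 0 ≥ th)) ∘
          (fun k : Nat => s + (k : Int))) := by
      funext k
      simp only [Function.comp_apply]
      rw [show s + 1 + (k : Int) = s + (k : Int) + 1 from by ring]
      rw [show s + (k : Int) + 1 - 1 = s + (k : Int) from by ring]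
    rw [hpred]
    have hmap : ((fun j : Int => j + 1) ∘ (fun k : Nat => s + (k : Int)))
        = fun k : Nat => s + 1 + (k : Int) := by
      funext k
      simp only [Function.comp_apply]
      ring
    rw [hmap]
  · rw [show PySem.List.pyRange (s + 1) L 1 = [] from PySem.List.pyRange_one_eq_nil (by omega)]
    rw [show ((PySem.List.pyRange 0 (L - 1) 1).find?
          (fun j => decide (s ≤ j) && PySem.List.pyGetD gaps j false)) = none from
        List.find?_eq_none.mpr (fun x hx => by
          have hxb := (PySem.List.mem_pyRange_one).mp hx
          simp only [Bool.and_eq_true, decide_eq_true_eq]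
          rintro ⟨hc, -⟩
          omega)]
    rfl

-- ===== VERDICT (by name: the statement is the Claim_ definition above) =====
theorem trim_indices_spec : Claim_equal_trim_indices := by
  intro inds tn th _
  unfold Spec_trim_indices trim_indices trim_indices_alt
  dsimp only []
  by_cases hne : inds = []
  · subst hne
    simp only [List.length_nil, Nat.cast_zero, List.zip_nil_left, List.map_nil, List.take_nil]
    rw [show PySem.List.pyRange 0 (min ((0:Int) - 1) tn) 1 = [] from
      PySem.List.pyRange_one_eq_nil (by omega)]
    rw [show PySem.List.pyRange ((0:Int) - 1) (max 0 (0 - tn - 1)) (-1) = [] from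
      PySem.List.pyRange_neg_one_eq_nil (by omega)]
    rw [show PySem.List.pyRange (0:Int) 0 1 = [] from PySem.List.pyRange_one_eq_nil (by omega)]
    simp [PySem.List.slice]
  · have h1 : 1 ≤ inds.length := List.length_pos_of_ne_nil hne
    rw [pv_main inds
      (fun i => PySem.List.pyGetD inds (i + 1) 0 - PySem.List.pyGetD inds i 0 ≥ th)
      (fun i => PySem.List.pyGetD inds i 0 - PySem.List.pyGetD inds (i - 1) 0 ≥ th)
      (min (((inds.length : Nat) : Int) - 1) tn) (max 0 (((inds.length : Nat) : Int) - tn - 1))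
      (le_max_left 0 _)]
    rw [pv_lo_eq inds tn th h1, pv_hi_eq inds tn th h1]
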